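-- pv_equiv track=rewrite | github.com/duckbill413/coding_test | python/programmers/택배_배달과_수거하기.py | solution
-- ===== SOURCE A (Python) =====
-- def solution(cap, n, deliveries, pickups):
--     answer = 0
--     total_delivery = total_return = 0
--
--     for i in range(n - 1, -1, -1):
--         total_delivery += deliveries[i]
--         total_return += pickups[i]
--
--         while total_delivery > 0 or total_return > 0:
--             total_delivery -= cap
--             total_return -= cap
--             answer += (i + 1) * 2
--
--     return answer
-- ===== SOURCE B (Python) =====
-- def solution(cap, n, deliveries, pickups):
--     # Inner while-loop replaced by an arithmetic (ceil-division) trip count.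
--     answer = 0
--     td = tr = 0
--     for i in range(n - 1, -1, -1):
--         td += deliveries[i]
--         tr += pickups[i]
--         k = max(0, -(-td // cap), -(-tr // cap))
--         td -= k * cap
--         tr -= k * cap
--         answer += k * (i + 1) * 2
--     return answer
-- ===== Notes on version B (the rewrite author's own statement) =====
-- stated objective: alternative
-- what changed: The inner while-loop that subtracts cap once per round trip is replaced by a ceil-division trip count computed arithmetically (not measurably faster on the generated inputs, whose totals keep A's inner loop short).
-- outside the precondition, e.g. on solution(-1, 1, [-2], [0]): A returns 0, B returns 4; on solution(0, 1, [0], [-1]): A returns 0, B raises ZeroDivisionError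
import Mathlib
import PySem

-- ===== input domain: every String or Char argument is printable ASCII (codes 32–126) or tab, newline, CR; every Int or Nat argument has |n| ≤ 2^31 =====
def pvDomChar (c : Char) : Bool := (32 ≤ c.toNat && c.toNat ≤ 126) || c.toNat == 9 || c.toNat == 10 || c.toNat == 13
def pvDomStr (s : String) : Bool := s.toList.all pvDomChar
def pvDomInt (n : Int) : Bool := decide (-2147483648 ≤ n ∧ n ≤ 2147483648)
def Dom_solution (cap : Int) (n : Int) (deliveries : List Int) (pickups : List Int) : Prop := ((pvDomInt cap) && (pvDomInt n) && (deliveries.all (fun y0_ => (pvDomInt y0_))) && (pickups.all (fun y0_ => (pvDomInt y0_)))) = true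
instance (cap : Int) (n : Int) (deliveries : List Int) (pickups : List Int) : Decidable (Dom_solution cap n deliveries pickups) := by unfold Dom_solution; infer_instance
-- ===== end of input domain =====

-- B replaces A's inner while-loop with an arithmetic ceil-division trip count (an alternative computation of the same per-stop result).

-- ===== PORT A =====
-- the 'while total_delivery > 0 or total_return > 0' loop; the fuel argument only
-- makes it total (with 1 ≤ cap the loop runs at most td.toNat + tr.toNat times,
-- so the fuel passed below is never exhausted on Pre_ inputs)
def solutionWhile (cap w : Int) (fuel : Nat) (td tr ans : Int) : Int × Int × Int :=
  match fuel with
  | 0 => (td, tr, ans)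
  | f + 1 =>
    if td > 0 ∨ tr > 0 then
      solutionWhile cap w f (td - cap) (tr - cap) (ans + w)
    else (td, tr, ans)

def solution (cap : Int) (n : Int) (deliveries : List Int) (pickups : List Int) : Int :=
  ((PySem.List.pyRange (n - 1) (-1) (-1)).foldl
    (fun st i =>
      let td := st.1 + PySem.List.pyGetD deliveries i 0
      let tr := st.2.1 + PySem.List.pyGetD pickups i 0
      solutionWhile cap ((i + 1) * 2) (td.toNat + tr.toNat + 1) td tr st.2.2)
    (0, 0, 0)).2.2

-- ===== PORT B =====
-- k = max(0, -(-td // cap), -(-tr // cap))  (Python ceil division)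
def tripCount (cap td tr : Int) : Int :=
  max (max 0 (-(PySem.Int.floordiv (-td) cap))) (-(PySem.Int.floordiv (-tr) cap))

def solution_alt (cap : Int) (n : Int) (deliveries : List Int) (pickups : List Int) : Int :=
  ((PySem.List.pyRange (n - 1) (-1) (-1)).foldl
    (fun st i =>
      let td := st.1 + PySem.List.pyGetD deliveries i 0
      let tr := st.2.1 + PySem.List.pyGetD pickups i 0
      let k := tripCount cap td tr
      (td - k * cap, tr - k * cap, st.2.2 + k * (i + 1) * 2))
    (0, 0, 0)).2.2

-- ===== PRECONDITION & SPEC =====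
-- Pre_ requires 1 ≤ cap unless the loop is empty (n ≤ 0): with cap ≤ 0 and a
-- nonempty loop, A's while-loop diverges whenever a running total is positive,
-- and even where A happens to return — all totals ≤ 0 — B's ceil division by
-- cap is a different value or a ZeroDivisionError; Pre_ also requires that the
-- first n entries of both lists exist (otherwise A raises IndexError).
def Pre_solution (cap : Int) (n : Int) (deliveries : List Int) (pickups : List Int) : Prop :=
  (1 ≤ cap ∨ n ≤ 0) ∧ n ≤ (deliveries.length : Int) ∧ n ≤ (pickups.length : Int)
instance (cap : Int) (n : Int) (deliveries : List Int) (pickups : List Int) : Decidable (Pre_solution cap n deliveries pickups) := by unfold Pre_solution; infer_instance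

def pvWitness_solution : Int × Int × List Int × List Int := (4, 2, [1, 0], [0, 3])

def Spec_solution (cap : Int) (n : Int) (deliveries : List Int) (pickups : List Int) (out : Int) : Prop := out = solution_alt cap n deliveries pickups
instance (cap : Int) (n : Int) (deliveries : List Int) (pickups : List Int) (out : Int) : Decidable (Spec_solution cap n deliveries pickups out) := by unfold Spec_solution; infer_instance

-- ===== CLAIM (what is proved, stated in full; the proofs are below) =====
def Claim_equal_solution : Prop := ∀ (cap : Int) (n : Int) (deliveries : List Int) (pickups : List Int), Dom_solution cap n deliveries pickups → Pre_solution cap n deliveries pickups → Spec_solution cap n deliveries pickups (solution cap n deliveries pickups)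

-- ===== LEMMAS AND PROOFS =====

-- ceiling-division bracket: c a := -((-a) // cap) satisfies (c-1)*cap < a ≤ c*cap
theorem pv_ceil_bracket (cap a : Int) (hcap : 1 ≤ cap) :
    (-(PySem.Int.floordiv (-a) cap) - 1) * cap < a ∧
    a ≤ -(PySem.Int.floordiv (-a) cap) * cap :=
  (PySem.Int.neg_floordiv_neg_eq_iff_of_pos (by omega)).mp rfl

theorem pv_ceil_pos (cap a : Int) (hcap : 1 ≤ cap) (ha : 0 < a) :
    1 ≤ -(PySem.Int.floordiv (-a) cap) := by
  obtain ⟨h1, h2⟩ := pv_ceil_bracket cap a hcap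
  nlinarith

theorem pv_ceil_nonpos (cap a : Int) (hcap : 1 ≤ cap) (ha : a ≤ 0) :
    -(PySem.Int.floordiv (-a) cap) ≤ 0 := by
  obtain ⟨h1, h2⟩ := pv_ceil_bracket cap a hcap
  nlinarith

theorem pv_ceil_le (cap a : Int) (hcap : 1 ≤ cap) :
    -(PySem.Int.floordiv (-a) cap) ≤ max a 0 := by
  obtain ⟨h1, h2⟩ := pv_ceil_bracket cap a hcap
  by_cases h : -(PySem.Int.floordiv (-a) cap) ≤ 0
  · omega
  · have h0 : 0 < -(PySem.Int.floordiv (-a) cap) := by omega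
    have : -(PySem.Int.floordiv (-a) cap) ≤ a := by nlinarith
    omega

theorem pv_ceil_shift (cap a : Int) (hcap : 1 ≤ cap) :
    -(PySem.Int.floordiv (-(a - cap)) cap) = -(PySem.Int.floordiv (-a) cap) - 1 := by
  obtain ⟨h1, h2⟩ := pv_ceil_bracket cap a hcap
  exact (PySem.Int.neg_floordiv_neg_eq_iff_of_pos (by omega)).mpr ⟨by nlinarith, by nlinarith⟩

theorem pv_trip_zero (cap td tr : Int) (hcap : 1 ≤ cap) (h1 : td ≤ 0) (h2 : tr ≤ 0) :
    tripCount cap td tr = 0 := by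
  have := pv_ceil_nonpos cap td hcap h1
  have := pv_ceil_nonpos cap tr hcap h2
  unfold tripCount; omega

theorem pv_trip_shift (cap td tr : Int) (hcap : 1 ≤ cap) (h : td > 0 ∨ tr > 0) :
    tripCount cap (td - cap) (tr - cap) = tripCount cap td tr - 1 := by
  have hs1 := pv_ceil_shift cap td hcap
  have hs2 := pv_ceil_shift cap tr hcap
  have hp : 1 ≤ -(PySem.Int.floordiv (-td) cap) ∨ 1 ≤ -(PySem.Int.floordiv (-tr) cap) := by
    rcases h with h | h
    · exact Or.inl (pv_ceil_pos cap td hcap h)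
    · exact Or.inr (pv_ceil_pos cap tr hcap h)
  unfold tripCount
  rw [hs1, hs2]
  omega

theorem pv_trip_le (cap td tr : Int) (hcap : 1 ≤ cap) :
    tripCount cap td tr ≤ (td.toNat : Int) + (tr.toNat : Int) := by
  have := pv_ceil_le cap td hcap
  have := pv_ceil_le cap tr hcap
  unfold tripCount; omega

-- the while-loop computes exactly tripCount trips when given enough fuel
theorem pv_while_eq (cap w : Int) (hcap : 1 ≤ cap) :
    ∀ (fuel : Nat) (td tr ans : Int), tripCount cap td tr ≤ (fuel : Int) →
      solutionWhile cap w fuel td tr ans =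
        (td - tripCount cap td tr * cap, tr - tripCount cap td tr * cap,
         ans + tripCount cap td tr * w) := by
  intro fuel
  induction fuel with
  | zero =>
    intro td tr ans hf
    have hk0 : 0 ≤ tripCount cap td tr := by unfold tripCount; omega
    have : tripCount cap td tr = 0 := by omega
    simp [solutionWhile, this]
  | succ f ih =>
    intro td tr ans hf
    unfold solutionWhile
    by_cases h : td > 0 ∨ tr > 0
    · rw [if_pos h]
      have hsh := pv_trip_shift cap td tr hcap h
      have hk1 : 1 ≤ tripCount cap td tr := by
        unfold tripCount
        rcases h with h | h
        · have := pv_ceil_pos cap td hcap h; omega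
        · have := pv_ceil_pos cap tr hcap h; omega
      rw [ih (td - cap) (tr - cap) (ans + w) (by rw [hsh]; omega)]
      rw [hsh]
      refine Prod.ext (by ring) (Prod.ext (by ring) (by ring))
    · rw [if_neg h]
      have h1 : td ≤ 0 := by by_contra hc; exact h (Or.inl (by omega))
      have h2 : tr ≤ 0 := by by_contra hc; exact h (Or.inr (by omega))
      rw [pv_trip_zero cap td tr hcap h1 h2]
      simp

-- the two fold steps agree pointwise
theorem pv_step_eq (cap : Int) (deliveries pickups : List Int) (hcap : 1 ≤ cap)
    (st : Int × Int × Int) (i : Int) :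
    (let td := st.1 + PySem.List.pyGetD deliveries i 0
     let tr := st.2.1 + PySem.List.pyGetD pickups i 0
     solutionWhile cap ((i + 1) * 2) (td.toNat + tr.toNat + 1) td tr st.2.2) =
    (let td := st.1 + PySem.List.pyGetD deliveries i 0
     let tr := st.2.1 + PySem.List.pyGetD pickups i 0
     let k := tripCount cap td tr
     (td - k * cap, tr - k * cap, st.2.2 + k * (i + 1) * 2)) := by
  simp only []
  rw [pv_while_eq cap ((i + 1) * 2) hcap _ _ _ _
    (by
      have := pv_trip_le cap (st.1 + PySem.List.pyGetD deliveries i 0)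
        (st.2.1 + PySem.List.pyGetD pickups i 0) hcap
      omega)]
  exact Prod.ext rfl (Prod.ext rfl (by ring))

-- hence the folds agree on any index list
theorem pv_fold_eq (cap : Int) (deliveries pickups : List Int) (hcap : 1 ≤ cap) :
    ∀ (l : List Int) (st : Int × Int × Int),
      l.foldl (fun st i =>
        let td := st.1 + PySem.List.pyGetD deliveries i 0
        let tr := st.2.1 + PySem.List.pyGetD pickups i 0
        solutionWhile cap ((i + 1) * 2) (td.toNat + tr.toNat + 1) td tr st.2.2) st =
      l.foldl (fun st i =>
        let td := st.1 + PySem.List.pyGetD deliveries i 0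
        let tr := st.2.1 + PySem.List.pyGetD pickups i 0
        let k := tripCount cap td tr
        (td - k * cap, tr - k * cap, st.2.2 + k * (i + 1) * 2)) st := by
  intro l
  induction l with
  | nil => intro st; rfl
  | cons i l ih =>
    intro st
    rw [List.foldl_cons, List.foldl_cons, pv_step_eq cap deliveries pickups hcap st i, ih]

-- ===== VERDICT (by name: the statement is the Claim_ definition above) =====
-- an empty loop: range(n-1, -1, -1) is [] for n ≤ 0
theorem pv_range_nil (n : Int) (h : n ≤ 0) : PySem.List.pyRange (n - 1) (-1) (-1) = [] := by
  simp [PySem.List.pyRange]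
  omega

theorem solution_spec : Claim_equal_solution := by
  intro cap n deliveries pickups _ hpre
  unfold Spec_solution solution solution_alt
  rcases hpre.1 with hcap | hn
  · rw [pv_fold_eq cap deliveries pickups hcap]
  · rw [pv_range_nil n hn]; rfl
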